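-- pv_equiv track=rewrite | github.com/scverse/rapids_singlecell | src/rapids_singlecell/pertpy_gpu/_metrics/_kernels/_edistance_kernel.py | _choose_feat_tile
-- ===== SOURCE A (Python) =====
-- TILE_SIZES = [32, 50, 64]
--
-- def _choose_feat_tile(
--     n_features: int, max_shared_bytes: int, cell_tile: int, dtype_size: int
-- ) -> int:
--     """
--     Choose optimal feat_tile based on n_features and shared memory limits.
--
--     Prioritizes exact divisibility to avoid partially-filled final tiles,
--     which incur full synchronization overhead for little work.
--
--     Parameters
--     ----------
--     n_features
--         Number of features in the embedding
--     max_shared_bytes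
--         Maximum shared memory available per block
--     cell_tile
--         Cell tile size (affects shared memory usage)
--     dtype_size
--         Size of data type in bytes (4 for float32, 8 for float64)
--
--     Returns
--     -------
--     int
--         Optimal feat_tile that fits in shared memory
--     """
--     # Filter tile sizes that fit in shared memory
--     # Shared memory usage: cell_tile * feat_tile * dtype_size + overhead for warp_sums
--     warp_sums_overhead = 32 * dtype_size  # warp_sums[32] in kernel
--     available_shared = max_shared_bytes - warp_sums_overhead
--
--     valid_tiles = [
--         t for t in TILE_SIZES if cell_tile * t * dtype_size <= available_shared
--     ]
--
--     if not valid_tiles: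
--         # Fallback: compute max possible tile size
--         max_feat_tile = available_shared // (cell_tile * dtype_size)
--         return max(16, max_feat_tile)  # Minimum tile of 16
--
--     # Check exact divisibility - prefer larger tiles (fewer iterations)
--     for tile in reversed(valid_tiles):
--         if n_features % tile == 0:
--             return tile
--
--     # No exact match - minimize (n_tiles, waste)
--     best_tile = valid_tiles[0]
--     best_n_tiles = (n_features + best_tile - 1) // best_tile
--     best_waste = best_tile - (n_features % best_tile or best_tile)
--
--     for tile in valid_tiles[1:]:
--         n_tiles = (n_features + tile - 1) // tile
--         remainder = n_features % tile
--         waste = 0 if remainder == 0 else tile - remainder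
--
--         # Prefer fewer tiles, then less waste
--         if n_tiles < best_n_tiles or (n_tiles == best_n_tiles and waste < best_waste):
--             best_tile = tile
--             best_n_tiles = n_tiles
--             best_waste = waste
--
--     return best_tile
-- ===== SOURCE B (Python) =====
-- TILE_SIZES = [32, 50, 64]
--
-- def _choose_feat_tile(
--     n_features: int, max_shared_bytes: int, cell_tile: int, dtype_size: int
-- ) -> int:
--     """Single keyed min() selection instead of two selection loops."""
--     available_shared = max_shared_bytes - 32 * dtype_size
--
--     valid_tiles = [
--         t for t in TILE_SIZES if cell_tile * t * dtype_size <= available_shared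
--     ]
--
--     if not valid_tiles:
--         return max(16, available_shared // (cell_tile * dtype_size))
--
--     def key(t):
--         r = n_features % t
--         if r == 0:
--             # any exact divisor beats every non-divisor; prefer the largest one
--             return (0, -t, 0)
--         # otherwise minimize (n_tiles, waste); min keeps the first on ties
--         return (1, (n_features + t - 1) // t, t - r)
--
--     return min(valid_tiles, key=key)
-- ===== Notes on version B (the rewrite author's own statement) =====
-- stated objective: simpler
-- what changed: Replaces A's two selection passes (a reversed divisibility early-return loop plus a strict-improvement fold over (n_tiles, waste)) with a single min(valid_tiles, key=...) using a composite key (divisor-priority, -tile for divisors, else (n_tiles, waste)), relying on min's first-on-ties rule; Pre_ only excludes inputs where A itself raises ZeroDivisionError.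
import Mathlib
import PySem

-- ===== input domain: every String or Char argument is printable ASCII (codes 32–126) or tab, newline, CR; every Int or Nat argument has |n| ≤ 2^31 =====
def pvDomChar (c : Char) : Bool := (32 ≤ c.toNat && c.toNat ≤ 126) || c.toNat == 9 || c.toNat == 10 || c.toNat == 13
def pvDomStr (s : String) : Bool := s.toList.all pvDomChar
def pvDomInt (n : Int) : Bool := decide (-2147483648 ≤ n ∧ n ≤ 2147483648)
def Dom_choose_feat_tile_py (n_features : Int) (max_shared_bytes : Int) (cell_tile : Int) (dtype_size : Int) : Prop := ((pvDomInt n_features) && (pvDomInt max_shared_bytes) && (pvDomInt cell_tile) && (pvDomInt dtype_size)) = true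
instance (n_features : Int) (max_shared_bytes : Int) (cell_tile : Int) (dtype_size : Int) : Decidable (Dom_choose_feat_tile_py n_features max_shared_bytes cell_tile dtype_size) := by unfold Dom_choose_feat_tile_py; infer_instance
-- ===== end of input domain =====

-- B replaces A's two selection loops with a single keyed min over the valid tiles (objective: simpler).

-- ===== PORT A =====
-- the `for tile in reversed(valid_tiles): if n_features % tile == 0: return tile` loop
def pvADivLoop (n : Int) : List Int → Option Int
  | [] => none
  | t :: rest => if PySem.Int.mod n t = 0 then some t else pvADivLoop n rest

-- the `for tile in valid_tiles[1:]:` strict-improvement fold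
def pvAFold (n : Int) (rest : List Int) (bt bn bw : Int) : Int :=
  match rest with
  | [] => bt
  | t :: rs =>
    let nt := PySem.Int.floordiv (n + t - 1) t
    let r := PySem.Int.mod n t
    let w := if r = 0 then (0 : Int) else t - r
    if nt < bn ∨ (nt = bn ∧ w < bw) then pvAFold n rs t nt w else pvAFold n rs bt bn bw

-- the whole nonempty-valid_tiles tail of A (divisibility loop, then the fold)
def pvASelect (n : Int) (b0 : Int) (rest : List Int) : Int :=
  match pvADivLoop n (b0 :: rest).reverse with
  | some t => t
  | none =>
    let best_n_tiles := PySem.Int.floordiv (n + b0 - 1) b0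
    let r0 := PySem.Int.mod n b0
    -- best_tile - (n % best_tile or best_tile)
    let best_waste := b0 - (if r0 = 0 then b0 else r0)
    pvAFold n rest b0 best_n_tiles best_waste

def choose_feat_tile_py (n_features : Int) (max_shared_bytes : Int) (cell_tile : Int) (dtype_size : Int) : Int :=
  let warp_sums_overhead := 32 * dtype_size
  let available_shared := max_shared_bytes - warp_sums_overhead
  let valid_tiles := ([32, 50, 64] : List Int).filter
      (fun t => cell_tile * t * dtype_size ≤ available_shared)
  match valid_tiles with
  | [] =>
    let max_feat_tile := PySem.Int.floordiv available_shared (cell_tile * dtype_size)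
    max 16 max_feat_tile
  | b0 :: rest => pvASelect n_features b0 rest

-- ===== PORT B =====
-- key(t): (0, -t, 0) for exact divisors, else (1, n_tiles, waste)
def pvBKey (n t : Int) : Int × Int × Int :=
  let r := PySem.Int.mod n t
  if r = 0 then (0, -t, 0)
  else (1, PySem.Int.floordiv (n + t - 1) t, t - r)

-- Python tuple '<' is lexicographic (hand-ported: Mathlib's Prod '<' is pointwise, not lexicographic)
def pvLtLex3 (a b : Int × Int × Int) : Bool :=
  a.1 < b.1 || (a.1 == b.1 && (a.2.1 < b.2.1 || (a.2.1 == b.2.1 && a.2.2 < b.2.2)))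

-- hand-port of min(valid_tiles, key=key): left scan keeping the first key-minimal element (exact)
def pvBMin (n : Int) (best : Int) : List Int → Int
  | [] => best
  | t :: rs => pvBMin n (if pvLtLex3 (pvBKey n t) (pvBKey n best) then t else best) rs

def choose_feat_tile_py_alt (n_features : Int) (max_shared_bytes : Int) (cell_tile : Int) (dtype_size : Int) : Int :=
  let available_shared := max_shared_bytes - 32 * dtype_size
  match ([32, 50, 64] : List Int).filter
      (fun t => cell_tile * t * dtype_size ≤ available_shared) with
  | [] => max 16 (PySem.Int.floordiv available_shared (cell_tile * dtype_size))
  | b0 :: rest => pvBMin n_features b0 rest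

-- ===== PRECONDITION & SPEC =====
-- Pre_ excludes exactly the inputs where A (and B) raise ZeroDivisionError: no tile fits
-- (available_shared < 0 with cell_tile*dtype_size = 0) and the fallback divides by zero.
def Pre_choose_feat_tile_py (n_features : Int) (max_shared_bytes : Int) (cell_tile : Int) (dtype_size : Int) : Prop :=
  cell_tile * dtype_size ≠ 0 ∨ 0 ≤ max_shared_bytes - 32 * dtype_size
instance (n_features : Int) (max_shared_bytes : Int) (cell_tile : Int) (dtype_size : Int) : Decidable (Pre_choose_feat_tile_py n_features max_shared_bytes cell_tile dtype_size) := by unfold Pre_choose_feat_tile_py; infer_instance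

def pvWitness_choose_feat_tile_py : Int × Int × Int × Int := (100, 48000, 32, 4)

def Spec_choose_feat_tile_py (n_features : Int) (max_shared_bytes : Int) (cell_tile : Int) (dtype_size : Int) (out : Int) : Prop := out = choose_feat_tile_py_alt n_features max_shared_bytes cell_tile dtype_size
instance (n_features : Int) (max_shared_bytes : Int) (cell_tile : Int) (dtype_size : Int) (out : Int) : Decidable (Spec_choose_feat_tile_py n_features max_shared_bytes cell_tile dtype_size out) := by unfold Spec_choose_feat_tile_py; infer_instance

-- ===== CLAIM (what is proved, stated in full; the proofs are below) =====
def Claim_equal_choose_feat_tile_py : Prop := ∀ (n_features : Int) (max_shared_bytes : Int) (cell_tile : Int) (dtype_size : Int), Dom_choose_feat_tile_py n_features max_shared_bytes cell_tile dtype_size → Pre_choose_feat_tile_py n_features max_shared_bytes cell_tile dtype_size → Spec_choose_feat_tile_py n_features max_shared_bytes cell_tile dtype_size (choose_feat_tile_py n_features max_shared_bytes cell_tile dtype_size)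

-- ===== LEMMAS AND PROOFS =====

-- the two selection strategies agree on each concrete tile list the filter can produce
theorem pvSel_single (n a : Int) (ha : 0 < a) :
    pvASelect n a [] = pvBMin n a [] := by
  simp [pvASelect, pvADivLoop, pvAFold, pvBMin]
  split_ifs <;> rfl

theorem pvSel_pair (n a b : Int) (ha : 0 < a) (hab : a < b) :
    pvASelect n a [b] = pvBMin n a [b] := by
  have mna := PySem.Int.mod_nonneg n (b := a) (by omega)
  have mla := PySem.Int.mod_lt n (b := a) (by omega)
  have mnb := PySem.Int.mod_nonneg n (b := b) (by omega)
  have mlb := PySem.Int.mod_lt n (b := b) (by omega)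
  by_cases da : PySem.Int.mod n a = 0 <;>
  by_cases db : PySem.Int.mod n b = 0 <;>
    simp [pvASelect, pvADivLoop, pvAFold, pvBMin, pvBKey, pvLtLex3, da, db] <;>
    (try split_ifs) <;> (try simp_all) <;> omega

theorem pvSel_triple (n a b c : Int) (ha : 0 < a) (hab : a < b) (hbc : b < c) :
    pvASelect n a [b, c] = pvBMin n a [b, c] := by
  have mna := PySem.Int.mod_nonneg n (b := a) (by omega)
  have mla := PySem.Int.mod_lt n (b := a) (by omega)
  have mnb := PySem.Int.mod_nonneg n (b := b) (by omega)
  have mlb := PySem.Int.mod_lt n (b := b) (by omega)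
  have mnc := PySem.Int.mod_nonneg n (b := c) (by omega)
  have mlc := PySem.Int.mod_lt n (b := c) (by omega)
  by_cases da : PySem.Int.mod n a = 0 <;>
  by_cases db : PySem.Int.mod n b = 0 <;>
  by_cases dc : PySem.Int.mod n c = 0 <;>
    simp [pvASelect, pvADivLoop, pvAFold, pvBMin, pvBKey, pvLtLex3, da, db, dc] <;>
    (try split_ifs) <;> (try simp_all) <;> omega

-- ===== VERDICT (by name: the statement is the Claim_ definition above) =====
theorem choose_feat_tile_py_spec : Claim_equal_choose_feat_tile_py := by
  intro n ms ct ds _ _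
  unfold Spec_choose_feat_tile_py choose_feat_tile_py choose_feat_tile_py_alt
  by_cases h32 : ct * 32 * ds ≤ ms - 32 * ds <;>
  by_cases h50 : ct * 50 * ds ≤ ms - 32 * ds <;>
  by_cases h64 : ct * 64 * ds ≤ ms - 32 * ds <;>
    simp only [List.filter, h32, h50, h64, decide_true, decide_false]
  · exact pvSel_triple n 32 50 64 (by norm_num) (by norm_num) (by norm_num)
  · exact pvSel_pair n 32 50 (by norm_num) (by norm_num)
  · exact pvSel_pair n 32 64 (by norm_num) (by norm_num)
  · exact pvSel_single n 32 (by norm_num)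
  · exact pvSel_pair n 50 64 (by norm_num) (by norm_num)
  · exact pvSel_single n 50 (by norm_num)
  · exact pvSel_single n 64 (by norm_num)
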